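-- pv_equiv track=rewrite | github.com/miliar/Code_Jam_Webscraper | solutions_python/solutions_year12_round0_nr3/1873.py | is_recycled_pair
-- ===== SOURCE A (Python) =====
-- def is_recycled_pair(n,m):
-- 	if n>=m:
-- 		return False
-- 	else:
-- 		n1=str(n)
-- 		n2=str(m)
-- 		for i in range(len(n1)):
-- 			n1=n1[-1]+n1[:-1]
-- 			if n1==n2:
-- 				return True
-- ===== SOURCE B (Python) =====
-- def is_recycled_pair(n, m):
--     if n >= m:
--         return False
--     sn, sm = str(n), str(m)
--     if len(sn) == len(sm) and sm in sn + sn: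
--         return True
-- ===== Notes on version B (the rewrite author's own statement) =====
-- stated objective: idiomatic
-- what changed: Replaces the explicit rotate-and-compare loop over every rotation of str(n) with the classic doubled-string test (len(sn)==len(sm) and sm in sn+sn), keeping the implicit None on no match.
import Mathlib
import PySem

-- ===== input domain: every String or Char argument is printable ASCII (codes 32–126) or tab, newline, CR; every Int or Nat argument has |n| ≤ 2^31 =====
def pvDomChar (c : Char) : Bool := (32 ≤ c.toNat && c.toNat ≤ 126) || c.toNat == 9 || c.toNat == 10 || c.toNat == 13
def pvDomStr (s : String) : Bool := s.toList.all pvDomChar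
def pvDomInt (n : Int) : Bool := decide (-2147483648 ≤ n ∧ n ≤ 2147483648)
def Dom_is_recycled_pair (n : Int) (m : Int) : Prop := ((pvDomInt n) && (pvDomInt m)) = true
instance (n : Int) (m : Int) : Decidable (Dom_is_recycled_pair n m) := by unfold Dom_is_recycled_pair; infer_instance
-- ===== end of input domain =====

-- B replaces A's rotate-and-compare loop with the doubled-string rotation test; same results, including the implicit None.


-- ===== PORT A =====
-- the for-loop: len(n1) iterations, each rotating n1 right by one and comparing with n2
def pvRotLoopA (n2 : List Char) : Nat → List Char → Option Bool
  | 0, _ => none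
  | k+1, n1 =>
    match PySem.List.pyGet? n1 (-1) with
    | none => none   -- IndexError (unreachable: the loop runs only when n1 is nonempty)
    | some c =>
      let n1' := c :: PySem.List.slice n1 none (some (-1))    -- n1 = n1[-1] + n1[:-1]
      if n1' = n2 then some true else pvRotLoopA n2 k n1'

def is_recycled_pair (n : Int) (m : Int) : Option Bool :=
  if n ≥ m then some false
  else
    let n1 := PySem.Int.toChars n
    let n2 := PySem.Int.toChars m
    pvRotLoopA n2 n1.length n1

-- ===== PORT B =====
def is_recycled_pair_alt (n : Int) (m : Int) : Option Bool :=
  if n ≥ m then some false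
  else
    let sn := PySem.Int.toChars n
    let sm := PySem.Int.toChars m
    if sn.length == sm.length && PySem.Chars.isIn sm (sn ++ sn) then some true else none

-- ===== PRECONDITION & SPEC =====
def Spec_is_recycled_pair (n : Int) (m : Int) (out : Option Bool) : Prop := out = is_recycled_pair_alt n m
instance (n : Int) (m : Int) (out : Option Bool) : Decidable (Spec_is_recycled_pair n m out) := by unfold Spec_is_recycled_pair; infer_instance

-- ===== CLAIM (what is proved, stated in full; the proofs are below) =====
def Claim_equal_is_recycled_pair : Prop := ∀ (n : Int) (m : Int), Dom_is_recycled_pair n m → Spec_is_recycled_pair n m (is_recycled_pair n m)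

-- ===== LEMMAS AND PROOFS =====

-- right rotation by one, the value A's loop body computes on a nonempty list
def pvRrot (s : List Char) : List Char :=
  match s.getLast? with
  | none => []
  | some c => c :: s.dropLast

lemma pvRotLoopA_step (t s : List Char) (k : Nat) (hs : s ≠ []) :
    pvRotLoopA t (k+1) s = if pvRrot s = t then some true else pvRotLoopA t k (pvRrot s) := by
  rcases List.eq_nil_or_concat s with rfl | ⟨l, a, rfl⟩
  · exact absurd rfl hs
  · simp [pvRotLoopA, pvRrot, pysem]

lemma pvRrot_eq_rotate (s : List Char) (hs : s ≠ []) :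
    pvRrot s = s.rotate (s.length - 1) := by
  rcases List.eq_nil_or_concat s with rfl | ⟨l, a, rfl⟩
  · exact absurd rfl hs
  · simp only [List.concat_eq_append]
    have h : (l ++ [a]).length - 1 = l.length := by simp
    rw [h, List.rotate_eq_drop_append_take (by simp)]
    simp [pvRrot]

lemma pvRrot_iter (s : List Char) (hs : s ≠ []) (i : Nat) :
    pvRrot^[i] s = s.rotate (i * (s.length - 1)) := by
  induction i with
  | zero => simp
  | succ i ih =>
    rw [Function.iterate_succ_apply', ih,
      pvRrot_eq_rotate _ (by simp [← List.length_pos_iff] at hs ⊢; omega),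
      List.length_rotate, List.rotate_rotate]
    ring_nf

lemma pvRotLoopA_cases (t : List Char) (k : Nat) (s : List Char) :
    pvRotLoopA t k s = some true ∨ pvRotLoopA t k s = none := by
  induction k generalizing s with
  | zero => right; rfl
  | succ k ih =>
    cases h : PySem.List.pyGet? s (-1) with
    | none => right; simp [pvRotLoopA, h]
    | some c =>
      simp only [pvRotLoopA, h]
      split
      · left; rfl
      · exact ih _

lemma pvRotLoopA_true_iff (t : List Char) (k : Nat) (s : List Char) (hs : s ≠ []) :
    pvRotLoopA t k s = some true ↔ ∃ i, 1 ≤ i ∧ i ≤ k ∧ pvRrot^[i] s = t := by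
  induction k generalizing s with
  | zero => simp [pvRotLoopA]
  | succ k ih =>
    rw [pvRotLoopA_step t s k hs]
    have hr : pvRrot s ≠ [] := by
      rw [pvRrot_eq_rotate s hs]
      simp [← List.length_pos_iff] at hs ⊢; omega
    split
    · rename_i h
      constructor
      · intro _; exact ⟨1, le_refl _, by omega, by simpa using h⟩
      · intro _; rfl
    · rename_i h
      rw [ih _ hr]
      constructor
      · rintro ⟨i, h1, h2, h3⟩
        exact ⟨i + 1, by omega, by omega, by rwa [Function.iterate_succ_apply]⟩
      · rintro ⟨i, h1, h2, h3⟩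
        rcases Nat.exists_eq_add_of_le h1 with ⟨j, rfl⟩
        match j with
        | 0 => exact absurd (by simpa using h3) h
        | j+1 =>
          refine ⟨j + 1, by omega, by omega, ?_⟩
          rw [← Function.iterate_succ_apply]
          have : 1 + (j + 1) = (j + 1) + 1 := by omega
          rwa [this] at h3

-- arithmetic bridge: i*(L-1) = (i-1)*L + (L-i) for 1 ≤ i ≤ L
lemma pvMulArith (i L : Nat) (h1 : 1 ≤ i) (h2 : i ≤ L) :
    i * (L - 1) = (i - 1) * L + (L - i) := by
  rcases Nat.exists_eq_add_of_le h1 with ⟨i', rfl⟩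
  rcases Nat.exists_eq_add_of_le h2 with ⟨d, hd⟩
  subst hd
  simp [Nat.add_mul, Nat.mul_add, Nat.mul_sub]
  generalize i' * d = X
  omega

lemma pvRotate_mul_cycle (s : List Char) (c a : Nat) :
    s.rotate (c * s.length + a) = s.rotate a := by
  induction c with
  | zero => simp
  | succ c ih =>
    have : (c + 1) * s.length + a = s.length + (c * s.length + a) := by ring
    rw [this, ← List.rotate_rotate, List.rotate_length, ih]

lemma pvExists_iter_iff_rotate (s t : List Char) (hs : s ≠ []) :
    (∃ i, 1 ≤ i ∧ i ≤ s.length ∧ pvRrot^[i] s = t) ↔ ∃ j, j < s.length ∧ s.rotate j = t := by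
  have hL : 0 < s.length := List.length_pos_iff.mpr hs
  constructor
  · rintro ⟨i, h1, h2, h3⟩
    rw [pvRrot_iter s hs i] at h3
    refine ⟨(i * (s.length - 1)) % s.length, Nat.mod_lt _ hL, ?_⟩
    rwa [List.rotate_mod]
  · rintro ⟨j, hj, h3⟩
    refine ⟨s.length - j, by omega, by omega, ?_⟩
    rw [pvRrot_iter s hs]
    rw [pvMulArith (s.length - j) s.length (by omega) (by omega)]
    have : s.length - (s.length - j) = j := by omega
    rw [this, pvRotate_mul_cycle]
    exact h3

lemma pvRotate_iff_infix (s t : List Char) (hs : s ≠ []) :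
    (∃ j, j < s.length ∧ s.rotate j = t) ↔ (t.length = s.length ∧ t <:+: s ++ s) := by
  have hL : 0 < s.length := List.length_pos_iff.mpr hs
  constructor
  · rintro ⟨j, hj, rfl⟩
    refine ⟨List.length_rotate s j, ⟨s.take j, s.drop j, ?_⟩⟩
    rw [List.rotate_eq_drop_append_take (by omega)]
    rw [← List.append_assoc, List.take_append_drop, List.append_assoc, List.take_append_drop]
  · rintro ⟨hlen, pre, post, heq⟩
    have hk : pre.length ≤ s.length := by
      have := congrArg List.length heq
      simp at this; omega
    have ht : s.rotate pre.length = t := by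
      have hdrop : (s ++ s).drop pre.length = t ++ post := by
        rw [← heq, List.append_assoc, List.drop_left]
      have hdrop2 : (s ++ s).drop pre.length = s.drop pre.length ++ s := by
        rw [List.drop_append]
        have : pre.length - s.length = 0 := by omega
        rw [this]; simp
      have htake : ((s ++ s).drop pre.length).take s.length = t := by
        rw [hdrop, ← hlen, List.take_left]
      rw [hdrop2, List.take_append] at htake
      rw [List.take_of_length_le (by simp)] at htake
      have : s.length - (s.drop pre.length).length = pre.length := by simp; omega
      rw [this] at htake
      rwa [List.rotate_eq_drop_append_take hk]
    exact ⟨pre.length % s.length, Nat.mod_lt _ hL, by rwa [List.rotate_mod]⟩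

lemma pvToChars_ne_nil (n : Int) : PySem.Int.toChars n ≠ [] := by
  intro h
  unfold PySem.Int.toChars at h
  split at h
  · simp at h
  · have := Nat.length_toDigits_pos (b := 10) (n := n.toNat)
    rw [h] at this; simp at this

-- ===== VERDICT (by name: the statement is the Claim_ definition above) =====
theorem is_recycled_pair_spec : Claim_equal_is_recycled_pair := by
  intro n m _
  unfold Spec_is_recycled_pair is_recycled_pair is_recycled_pair_alt
  by_cases h : n ≥ m
  · simp [h]
  · simp only [h, if_false]
    set s := PySem.Int.toChars n with hsdef
    set t := PySem.Int.toChars m with htdef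
    have hs : s ≠ [] := pvToChars_ne_nil n
    have key : pvRotLoopA t s.length s = some true ↔
        (s.length == t.length && PySem.Chars.isIn t (s ++ s)) = true := by
      rw [pvRotLoopA_true_iff t s.length s hs, pvExists_iter_iff_rotate s t hs,
        pvRotate_iff_infix s t hs]
      rw [Bool.and_eq_true, beq_iff_eq, PySem.Chars.isIn_iff_infix]
      constructor
      · rintro ⟨h1, h2⟩; exact ⟨h1.symm, h2⟩
      · rintro ⟨h1, h2⟩; exact ⟨h1.symm, h2⟩
    by_cases hc : (s.length == t.length && PySem.Chars.isIn t (s ++ s)) = true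
    · rw [if_pos hc]; exact key.mpr hc
    · rw [if_neg hc]
      rcases pvRotLoopA_cases t s.length s with h1 | h1
      · exact absurd (key.mp h1) hc
      · exact h1
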